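-- pv_equiv track=rewrite | github.com/HenriHyttinen/Ai-assistant | backend/scripts/import_real_recipes.py | determine_cuisine_and_meal_type
-- ===== SOURCE A (Python) =====
-- def determine_cuisine_and_meal_type(title, categories):
--     """Determine cuisine and meal type from title and categories"""
--     title_lower = title.lower()
--     categories_lower = categories.lower() if categories else ""
--
--     # Determine cuisine
--     cuisine = "International"
--     if any(word in title_lower for word in ['italian', 'pasta', 'pizza', 'risotto', 'bruschetta']):
--         cuisine = "Italian"
--     elif any(word in title_lower for word in ['mexican', 'taco', 'burrito', 'enchilada', 'quesadilla']):
--         cuisine = "Mexican"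
--     elif any(word in title_lower for word in ['chinese', 'kung pao', 'lo mein', 'stir fry']):
--         cuisine = "Chinese"
--     elif any(word in title_lower for word in ['thai', 'pad thai', 'curry', 'tom yum']):
--         cuisine = "Thai"
--     elif any(word in title_lower for word in ['japanese', 'sushi', 'ramen', 'tempura', 'miso']):
--         cuisine = "Japanese"
--     elif any(word in title_lower for word in ['korean', 'kimchi', 'bulgogi', 'bibimbap']):
--         cuisine = "Korean"
--     elif any(word in title_lower for word in ['indian', 'curry', 'tikka', 'biryani', 'naan']):
--         cuisine = "Indian"
--     elif any(word in title_lower for word in ['french', 'coq au vin', 'ratatouille', 'crêpe']):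
--         cuisine = "French"
--     elif any(word in title_lower for word in ['german', 'schnitzel', 'bratwurst', 'sauerkraut']):
--         cuisine = "German"
--     elif any(word in title_lower for word in ['spanish', 'paella', 'tapas', 'gazpacho']):
--         cuisine = "Spanish"
--     elif any(word in title_lower for word in ['greek', 'moussaka', 'souvlaki', 'tzatziki']):
--         cuisine = "Greek"
--     elif any(word in title_lower for word in ['middle eastern', 'hummus', 'falafel', 'kebab']):
--         cuisine = "Middle Eastern"
--     elif any(word in title_lower for word in ['american', 'burger', 'bbq', 'mac and cheese']):
--         cuisine = "American"
--
--     # Determine meal type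
--     meal_type = "main_course"
--     if any(word in title_lower for word in ['pancake', 'waffle', 'breakfast', 'oat', 'cereal', 'muffin']):
--         meal_type = "breakfast"
--     elif any(word in title_lower for word in ['salad', 'soup', 'lunch', 'sandwich']):
--         meal_type = "lunch"
--     elif any(word in title_lower for word in ['dessert', 'cake', 'pie', 'cookie', 'ice cream', 'pudding']):
--         meal_type = "dessert"
--     elif any(word in title_lower for word in ['snack', 'appetizer', 'dip']):
--         meal_type = "snack"
--
--     return cuisine, meal_type
-- ===== SOURCE B (Python) =====
-- # Different algorithm: instead of testing every keyword against the title
-- # (keyword-driven substring search, as the original elif chain does), scan the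
-- # TITLE once and hash-look-up each substring of the relevant lengths in flat
-- # keyword->priority maps, keeping the minimum priority seen; the label lists
-- # turn the best priority (or the sentinel) into the result.
-- #
-- # The maps are precomputed from the original rule order; a keyword listed under
-- # several cuisines keeps the priority of its first (highest-precedence) rule,
-- # so 'curry' -> 3 (Thai), never Indian, exactly as the elif chain resolves it.
--
-- _CUISINE_PRI = {
--     'italian': 0, 'pasta': 0, 'pizza': 0, 'risotto': 0, 'bruschetta': 0,
--     'mexican': 1, 'taco': 1, 'burrito': 1, 'enchilada': 1, 'quesadilla': 1,
--     'chinese': 2, 'kung pao': 2, 'lo mein': 2, 'stir fry': 2,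
--     'thai': 3, 'pad thai': 3, 'curry': 3, 'tom yum': 3,
--     'japanese': 4, 'sushi': 4, 'ramen': 4, 'tempura': 4, 'miso': 4,
--     'korean': 5, 'kimchi': 5, 'bulgogi': 5, 'bibimbap': 5,
--     'indian': 6, 'tikka': 6, 'biryani': 6, 'naan': 6,
--     'french': 7, 'coq au vin': 7, 'ratatouille': 7, 'crêpe': 7,
--     'german': 8, 'schnitzel': 8, 'bratwurst': 8, 'sauerkraut': 8,
--     'spanish': 9, 'paella': 9, 'tapas': 9, 'gazpacho': 9,
--     'greek': 10, 'moussaka': 10, 'souvlaki': 10, 'tzatziki': 10,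
--     'middle eastern': 11, 'hummus': 11, 'falafel': 11, 'kebab': 11,
--     'american': 12, 'burger': 12, 'bbq': 12, 'mac and cheese': 12,
-- }
-- _CUISINE_LABELS = ["Italian", "Mexican", "Chinese", "Thai", "Japanese",
--                    "Korean", "Indian", "French", "German", "Spanish", "Greek",
--                    "Middle Eastern", "American", "International"]
--
-- _MEAL_PRI = {
--     'pancake': 0, 'waffle': 0, 'breakfast': 0, 'oat': 0, 'cereal': 0, 'muffin': 0,
--     'salad': 1, 'soup': 1, 'lunch': 1, 'sandwich': 1,
--     'dessert': 2, 'cake': 2, 'pie': 2, 'cookie': 2, 'ice cream': 2, 'pudding': 2,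
--     'snack': 3, 'appetizer': 3, 'dip': 3,
-- }
-- _MEAL_LABELS = ["breakfast", "lunch", "dessert", "snack", "main_course"]
--
-- # the distinct keyword lengths occurring in either map (precomputed)
-- _LENS = [3, 4, 5, 6, 7, 8, 9, 10, 11, 14]
--
--
-- def determine_cuisine_and_meal_type(title, categories):
--     """Determine cuisine and meal type from title and categories"""
--     t = title.lower()
--     bc = 13  # sentinel = number of cuisine rules -> "International"
--     bm = 4   # sentinel = number of meal rules -> "main_course"
--     for i in range(len(t)):
--         for L in _LENS:
--             sub = t[i:i + L]
--             p = _CUISINE_PRI.get(sub)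
--             if p is not None and p < bc:
--                 bc = p
--             p = _MEAL_PRI.get(sub)
--             if p is not None and p < bm:
--                 bm = p
--     return _CUISINE_LABELS[bc], _MEAL_LABELS[bm]
-- ===== Notes on version B (the rewrite author's own statement) =====
-- stated objective: alternative
-- what changed: Replaces the keyword-driven elif chain (test each of ~65 keywords for substring occurrence in the title) by a text-driven scan: one pass over the title's positions, hash-looking-up each substring of the relevant lengths in flat keyword-to-priority dicts and keeping the minimum priority, which label lists map to the result; A's dead categories_lower computation is dropped (categories never affects the result).
import Mathlib
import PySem

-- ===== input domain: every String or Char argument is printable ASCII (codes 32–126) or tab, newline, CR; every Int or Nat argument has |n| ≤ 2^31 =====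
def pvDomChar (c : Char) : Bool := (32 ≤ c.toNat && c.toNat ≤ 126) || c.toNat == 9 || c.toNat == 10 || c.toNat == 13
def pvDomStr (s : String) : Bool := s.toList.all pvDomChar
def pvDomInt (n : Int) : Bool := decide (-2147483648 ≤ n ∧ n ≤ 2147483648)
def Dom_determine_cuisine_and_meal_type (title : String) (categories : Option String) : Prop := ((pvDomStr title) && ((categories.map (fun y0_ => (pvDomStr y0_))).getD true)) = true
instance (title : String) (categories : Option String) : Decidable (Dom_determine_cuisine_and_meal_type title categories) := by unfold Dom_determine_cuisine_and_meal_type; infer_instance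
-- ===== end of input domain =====

-- B replaces A's keyword-driven elif chain (test every keyword against the title)
-- by a text-driven scan: one pass over the title's positions, hash-looking-up each
-- substring of the relevant lengths in flat keyword→priority maps and keeping the
-- minimum priority (objective: alternative algorithm; return value only).

-- ===== PORT A =====
def determine_cuisine_and_meal_type (title : String) (categories : Option String) : String × String :=
  let title_lower := PySem.Str.lower title
  -- categories_lower = categories.lower() if categories else "" (computed, never used — kept literally)
  let _categories_lower :=
    match categories with
    | some c => if c ≠ "" then PySem.Str.lower c else ""
    | none => ""
  let cuisine :=
    if ["italian", "pasta", "pizza", "risotto", "bruschetta"].any (fun w => PySem.Str.isIn w title_lower) then "Italian"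
    else if ["mexican", "taco", "burrito", "enchilada", "quesadilla"].any (fun w => PySem.Str.isIn w title_lower) then "Mexican"
    else if ["chinese", "kung pao", "lo mein", "stir fry"].any (fun w => PySem.Str.isIn w title_lower) then "Chinese"
    else if ["thai", "pad thai", "curry", "tom yum"].any (fun w => PySem.Str.isIn w title_lower) then "Thai"
    else if ["japanese", "sushi", "ramen", "tempura", "miso"].any (fun w => PySem.Str.isIn w title_lower) then "Japanese"
    else if ["korean", "kimchi", "bulgogi", "bibimbap"].any (fun w => PySem.Str.isIn w title_lower) then "Korean"
    else if ["indian", "curry", "tikka", "biryani", "naan"].any (fun w => PySem.Str.isIn w title_lower) then "Indian"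
    else if ["french", "coq au vin", "ratatouille", "crêpe"].any (fun w => PySem.Str.isIn w title_lower) then "French"
    else if ["german", "schnitzel", "bratwurst", "sauerkraut"].any (fun w => PySem.Str.isIn w title_lower) then "German"
    else if ["spanish", "paella", "tapas", "gazpacho"].any (fun w => PySem.Str.isIn w title_lower) then "Spanish"
    else if ["greek", "moussaka", "souvlaki", "tzatziki"].any (fun w => PySem.Str.isIn w title_lower) then "Greek"
    else if ["middle eastern", "hummus", "falafel", "kebab"].any (fun w => PySem.Str.isIn w title_lower) then "Middle Eastern"
    else if ["american", "burger", "bbq", "mac and cheese"].any (fun w => PySem.Str.isIn w title_lower) then "American"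
    else "International"
  let meal_type :=
    if ["pancake", "waffle", "breakfast", "oat", "cereal", "muffin"].any (fun w => PySem.Str.isIn w title_lower) then "breakfast"
    else if ["salad", "soup", "lunch", "sandwich"].any (fun w => PySem.Str.isIn w title_lower) then "lunch"
    else if ["dessert", "cake", "pie", "cookie", "ice cream", "pudding"].any (fun w => PySem.Str.isIn w title_lower) then "dessert"
    else if ["snack", "appetizer", "dip"].any (fun w => PySem.Str.isIn w title_lower) then "snack"
    else "main_course"
  (cuisine, meal_type)

-- ===== PORT B =====
-- flat keyword → priority maps (a keyword under several cuisines keeps its first,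
-- highest-precedence priority: 'curry' → 3)
def pvCuisinePri : PySem.Dict String Nat := PySem.Dict.ofList
  [("italian", 0), ("pasta", 0), ("pizza", 0), ("risotto", 0), ("bruschetta", 0),
   ("mexican", 1), ("taco", 1), ("burrito", 1), ("enchilada", 1), ("quesadilla", 1),
   ("chinese", 2), ("kung pao", 2), ("lo mein", 2), ("stir fry", 2),
   ("thai", 3), ("pad thai", 3), ("curry", 3), ("tom yum", 3),
   ("japanese", 4), ("sushi", 4), ("ramen", 4), ("tempura", 4), ("miso", 4),
   ("korean", 5), ("kimchi", 5), ("bulgogi", 5), ("bibimbap", 5),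
   ("indian", 6), ("tikka", 6), ("biryani", 6), ("naan", 6),
   ("french", 7), ("coq au vin", 7), ("ratatouille", 7), ("crêpe", 7),
   ("german", 8), ("schnitzel", 8), ("bratwurst", 8), ("sauerkraut", 8),
   ("spanish", 9), ("paella", 9), ("tapas", 9), ("gazpacho", 9),
   ("greek", 10), ("moussaka", 10), ("souvlaki", 10), ("tzatziki", 10),
   ("middle eastern", 11), ("hummus", 11), ("falafel", 11), ("kebab", 11),
   ("american", 12), ("burger", 12), ("bbq", 12), ("mac and cheese", 12)]

def pvMealPri : PySem.Dict String Nat := PySem.Dict.ofList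
  [("pancake", 0), ("waffle", 0), ("breakfast", 0), ("oat", 0), ("cereal", 0), ("muffin", 0),
   ("salad", 1), ("soup", 1), ("lunch", 1), ("sandwich", 1),
   ("dessert", 2), ("cake", 2), ("pie", 2), ("cookie", 2), ("ice cream", 2), ("pudding", 2),
   ("snack", 3), ("appetizer", 3), ("dip", 3)]

def pvCuisineLabels : List String :=
  ["Italian", "Mexican", "Chinese", "Thai", "Japanese", "Korean", "Indian",
   "French", "German", "Spanish", "Greek", "Middle Eastern", "American", "International"]

def pvMealLabels : List String := ["breakfast", "lunch", "dessert", "snack", "main_course"]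

-- the distinct keyword lengths occurring in either map (precomputed, as in Source B)
def pvLens : List Int := [3, 4, 5, 6, 7, 8, 9, 10, 11, 14]

-- 'p = m.get(sub); if p is not None and p < b: b = p'
def pvUpd (m : PySem.Dict String Nat) (b : Nat) (sub : String) : Nat :=
  match m.get? sub with
  | some p => if p < b then p else b
  | none => b

def determine_cuisine_and_meal_type_alt (title : String) (categories : Option String) : String × String :=
  let t := PySem.Str.lower title
  let best := (PySem.List.pyRange 0 (PySem.Str.len t) 1).foldl
    (fun (b : Nat × Nat) i =>
      pvLens.foldl (fun (b : Nat × Nat) L =>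
        let sub := PySem.Str.slice t (some i) (some (i + L))
        (pvUpd pvCuisinePri b.1 sub, pvUpd pvMealPri b.2 sub)) b)
    (13, 4)
  (pvCuisineLabels.getD best.1 "", pvMealLabels.getD best.2 "")

-- ===== PRECONDITION & SPEC =====
def Spec_determine_cuisine_and_meal_type (title : String) (categories : Option String) (out : String × String) : Prop := out = determine_cuisine_and_meal_type_alt title categories
instance (title : String) (categories : Option String) (out : String × String) : Decidable (Spec_determine_cuisine_and_meal_type title categories out) := by unfold Spec_determine_cuisine_and_meal_type; infer_instance

-- ===== CLAIM =====
def Claim_equal_determine_cuisine_and_meal_type : Prop := ∀ (title : String) (categories : Option String), Dom_determine_cuisine_and_meal_type title categories → Spec_determine_cuisine_and_meal_type title categories (determine_cuisine_and_meal_type title categories)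

-- ===== LEMMAS AND PROOFS =====

-- the rule tables of A, as lists (proof-side only)
def pvCuisineKws : List (List String) :=
  [["italian", "pasta", "pizza", "risotto", "bruschetta"],
   ["mexican", "taco", "burrito", "enchilada", "quesadilla"],
   ["chinese", "kung pao", "lo mein", "stir fry"],
   ["thai", "pad thai", "curry", "tom yum"],
   ["japanese", "sushi", "ramen", "tempura", "miso"],
   ["korean", "kimchi", "bulgogi", "bibimbap"],
   ["indian", "curry", "tikka", "biryani", "naan"],
   ["french", "coq au vin", "ratatouille", "crêpe"],
   ["german", "schnitzel", "bratwurst", "sauerkraut"],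
   ["spanish", "paella", "tapas", "gazpacho"],
   ["greek", "moussaka", "souvlaki", "tzatziki"],
   ["middle eastern", "hummus", "falafel", "kebab"],
   ["american", "burger", "bbq", "mac and cheese"]]

def pvMealKws : List (List String) :=
  [["pancake", "waffle", "breakfast", "oat", "cereal", "muffin"],
   ["salad", "soup", "lunch", "sandwich"],
   ["dessert", "cake", "pie", "cookie", "ice cream", "pudding"],
   ["snack", "appetizer", "dip"]]

-- index of the first matching rule (= number of rules if none matches)
def pvFirstIdx (t : String) : List (List String) → Nat
  | [] => 0
  | kws :: rest => if kws.any (fun w => PySem.Str.isIn w t) then 0 else pvFirstIdx t rest + 1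

-- the substrings B inspects, and the priorities it finds
def pvSubs (t : String) : List String :=
  (PySem.List.pyRange 0 (PySem.Str.len t) 1).flatMap
    (fun i => pvLens.map (fun L => PySem.Str.slice t (some i) (some (i + L))))

def pvHits (m : PySem.Dict String Nat) (t : String) : List Nat := (pvSubs t).filterMap m.get?

-- ---- generic fold lemmas ----
theorem pvFoldlPairSplit {α β γ : Type} (f1 : β → α → β) (f2 : γ → α → γ) (l : List α) (b : β × γ) :
    l.foldl (fun p x => (f1 p.1 x, f2 p.2 x)) b = (l.foldl f1 b.1, l.foldl f2 b.2) := by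
  induction l generalizing b with
  | nil => rfl
  | cons x xs ih => exact ih (f1 b.1 x, f2 b.2 x)

theorem pvFoldlFoldlFlatMap {α β σ : Type} (f : σ → β → σ) (g : α → List β) (l : List α) (s : σ) :
    l.foldl (fun s x => (g x).foldl f s) s = (l.flatMap g).foldl f s := by
  induction l generalizing s with
  | nil => rfl
  | cons x xs ih => simp [List.foldl_append, ih]

theorem pvFoldlUpdEqMin (m : PySem.Dict String Nat) (l : List String) (c : Nat) :
    l.foldl (fun c s => pvUpd m c s) c = (l.filterMap m.get?).foldl min c := by
  induction l generalizing c with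
  | nil => rfl
  | cons s rest ih =>
    cases h : m.get? s with
    | none =>
      have hc : pvUpd m c s = c := by simp [pvUpd, h]
      simp only [List.foldl_cons, hc, List.filterMap_cons, h]
      exact ih c
    | some p =>
      have hc : pvUpd m c s = min c p := by
        simp only [pvUpd, h]
        split <;> omega
      simp only [List.foldl_cons, hc, List.filterMap_cons, h]
      exact ih (min c p)

theorem pvFoldlMinCases (l : List Nat) (c : Nat) :
    (l.foldl min c = c ∨ l.foldl min c ∈ l) ∧ l.foldl min c ≤ c ∧ ∀ p ∈ l, l.foldl min c ≤ p := by
  induction l generalizing c with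
  | nil => simp
  | cons x xs ih =>
    obtain ⟨h1, h2, h3⟩ := ih (min c x)
    refine ⟨?_, ?_, ?_⟩
    · rcases h1 with h | h
      · rcases Nat.le_total c x with hcx | hxc
        · left; simp only [List.foldl_cons]; omega
        · right; simp only [List.foldl_cons]
          have hx : List.foldl min (min c x) xs = x := by omega
          rw [hx]; exact List.mem_cons_self
      · right; exact List.mem_cons_of_mem _ h
    · simp only [List.foldl_cons]; omega
    · intro p hp
      rcases List.mem_cons.mp hp with rfl | hp
      · simp only [List.foldl_cons]; omega
      · exact h3 p hp

-- ---- firstIdx lemmas ----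
theorem pvFirstIdx_le (t : String) (rs : List (List String)) : pvFirstIdx t rs ≤ rs.length := by
  induction rs with
  | nil => simp [pvFirstIdx]
  | cons r rest ih =>
    simp only [pvFirstIdx, List.length_cons]
    split
    · omega
    · omega

theorem pvFirstIdx_mtch (t : String) (rs : List (List String)) (h : pvFirstIdx t rs < rs.length) :
    (rs.getD (pvFirstIdx t rs) []).any (fun w => PySem.Str.isIn w t) = true := by
  induction rs with
  | nil => simp at h
  | cons r rest ih =>
    by_cases hc : r.any (fun w => PySem.Str.isIn w t) = true
    · simp only [pvFirstIdx]
      rw [if_pos hc, List.getD_cons_zero]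
      exact hc
    · simp only [pvFirstIdx] at h ⊢
      rw [if_neg hc] at h ⊢
      rw [List.getD_cons_succ]
      exact ih (by simp only [List.length_cons] at h; omega)

theorem pvFirstIdx_min (t : String) (rs : List (List String)) (r : Nat) (hr : r < rs.length)
    (hm : (rs.getD r []).any (fun w => PySem.Str.isIn w t) = true) : pvFirstIdx t rs ≤ r := by
  induction rs generalizing r with
  | nil => simp at hr
  | cons k rest ih =>
    by_cases hc : k.any (fun w => PySem.Str.isIn w t) = true
    · simp only [pvFirstIdx]
      rw [if_pos hc]
      omega
    · cases r with
      | zero =>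
        rw [List.getD_cons_zero] at hm
        exact absurd hm hc
      | succ r' =>
        simp only [pvFirstIdx]
        rw [if_neg hc]
        rw [List.getD_cons_succ] at hm
        have := ih r' (by simp only [List.length_cons] at hr; omega) hm
        omega

-- ---- dict lemma ----
theorem pvGetMemItems {ν : Type} (l : List (String × ν)) (k : String) (v : ν)
    (h : (PySem.Dict.mk l).get? k = some v) : (k, v) ∈ l := by
  induction l with
  | nil => simp [PySem.Dict.get?] at h
  | cons kv rest ih =>
    rw [show (PySem.Dict.mk (kv :: rest)) = PySem.Dict.mk ((kv.1, kv.2) :: rest) by rfl,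
        PySem.Dict.get?_mk_cons] at h
    split at h
    · rename_i heq
      have hk : kv.1 = k := by simpa using heq
      cases h
      rw [← hk]
      exact List.mem_cons_self
    · exact List.mem_cons_of_mem _ (ih h)

-- ---- occurrence ↔ hit, generic over (map, rule table) ----
theorem pvHitsSound (m : PySem.Dict String Nat) (rs : List (List String)) (t : String)
    (hfact : ∀ kp ∈ m.items, kp.2 < rs.length ∧ kp.1 ∈ rs.getD kp.2 []) :
    ∀ p ∈ pvHits m t, p < rs.length ∧ (rs.getD p []).any (fun w => PySem.Str.isIn w t) = true := by
  intro p hp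
  obtain ⟨sub, hsub, hget⟩ := List.mem_filterMap.mp hp
  have hmem : (sub, p) ∈ m.items := by
    have := pvGetMemItems m.items sub p (by cases m; exact hget)
    exact this
  obtain ⟨hplt, hkw⟩ := hfact (sub, p) hmem
  refine ⟨hplt, ?_⟩
  -- sub occurs in t (it is a slice of t)
  obtain ⟨i, hi, hL⟩ := List.mem_flatMap.mp hsub
  obtain ⟨L, hLmem, rfl⟩ := List.mem_map.mp hL
  have hi0 : 0 ≤ i := (PySem.List.mem_pyRange_one.mp hi).1
  have hL0 : 0 < L := (by decide : ∀ L ∈ pvLens, 0 < L) L hLmem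
  have hinf : (PySem.Str.slice t (some i) (some (i + L))).toList <:+: t.toList := by
    rw [PySem.Str.toList_slice, PySem.Chars.slice_eq_listSlice,
        PySem.List.slice_toNat _ hi0 (by omega)]
    exact ((List.take_prefix _ _).isInfix).trans ((List.drop_suffix _ _).isInfix)
  have hisin : PySem.Str.isIn (PySem.Str.slice t (some i) (some (i + L))) t = true :=
    (PySem.Str.isIn_iff_infix _ _).mpr hinf
  exact List.any_eq_true.mpr ⟨_, hkw, hisin⟩

theorem pvHitsComplete (m : PySem.Dict String Nat) (rs : List (List String)) (t : String)
    (hfact : ∀ r ∈ List.range rs.length, ∀ w ∈ rs.getD r [],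
      ∃ p ∈ List.range rs.length, p ≤ r ∧ m.get? w = some p ∧
        ((w.toList.length : Int)) ∈ pvLens ∧ w.toList ≠ []) :
    ∀ r, r < rs.length → (rs.getD r []).any (fun w => PySem.Str.isIn w t) = true →
      ∃ p ∈ pvHits m t, p ≤ r := by
  intro r hr hany
  obtain ⟨w, hw, hisin⟩ := List.any_eq_true.mp hany
  obtain ⟨p, _, hpr, hget, hlen, hne⟩ := hfact r (List.mem_range.mpr hr) w hw
  -- w occurs in t: ∃ j, w.toList <+: t.toList.drop j
  have hinf : w.toList <:+: t.toList := (PySem.Str.isIn_iff_infix _ _).mp hisin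
  obtain ⟨j, hpre⟩ := (PySem.Chars.exists_prefix_drop_iff_isIn w.toList t.toList).mpr
    (by rw [← PySem.Str.isIn_iff_infix] at hinf
        rwa [show PySem.Str.isIn w t = PySem.Chars.isIn w.toList t.toList from rfl] at hinf)
  have hjlt : j < t.toList.length := by
    by_contra hj
    have : t.toList.drop j = [] := List.drop_eq_nil_of_le (by omega)
    rw [this] at hpre
    exact hne (List.prefix_nil.mp hpre)
  -- the slice of t at j with w's length is exactly w
  have hslice : PySem.Str.slice t (some (j : Int)) (some ((j : Int) + (w.toList.length : Int))) = w := by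
    apply String.toList_inj.mp
    rw [PySem.Str.toList_slice, PySem.Chars.slice_eq_listSlice]
    rw [show ((j : Int) + (w.toList.length : Int)) = ((j + w.toList.length : Nat) : Int) by push_cast; ring]
    rw [PySem.List.slice_natCast]
    have := List.prefix_iff_eq_take.mp hpre
    rw [show j + w.toList.length - j = w.toList.length by omega]
    exact this.symm
  refine ⟨p, ?_, hpr⟩
  apply List.mem_filterMap.mpr
  refine ⟨PySem.Str.slice t (some (j : Int)) (some ((j : Int) + (w.toList.length : Int))), ?_, by rw [hslice]; exact hget⟩
  apply List.mem_flatMap.mpr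
  refine ⟨(j : Int), ?_, ?_⟩
  · rw [PySem.List.mem_pyRange_one]
    constructor
    · exact_mod_cast Nat.zero_le j
    · rw [PySem.Str.len_eq]
      exact_mod_cast hjlt
  · exact List.mem_map.mpr ⟨(w.toList.length : Int), hlen, rfl⟩

-- ---- the core arithmetic glue ----
theorem pvMinEqFirst (N fi bc : Nat) (hits : List Nat) (M : Nat → Prop)
    (hfiN : fi ≤ N) (hfiM : fi < N → M fi) (hfiMin : ∀ r, r < N → M r → fi ≤ r)
    (hbc : bc = N ∨ bc ∈ hits) (hbcN : bc ≤ N) (hbcLe : ∀ p ∈ hits, bc ≤ p)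
    (hSound : ∀ p ∈ hits, p < N ∧ M p) (hComplete : ∀ r, r < N → M r → ∃ p ∈ hits, p ≤ r) :
    bc = fi := by
  by_cases hlt : fi < N
  · obtain ⟨p, hp, hple⟩ := hComplete fi hlt (hfiM hlt)
    have hbcp := hbcLe p hp
    have hbclt : bc < N := by
      have := (hSound p hp).1; omega
    rcases hbc with rfl | hbcmem
    · omega
    · obtain ⟨hbcN', hMbc⟩ := hSound bc hbcmem
      have := hfiMin bc hbcN' hMbc
      omega
  · -- no rule matches: hits is empty
    have hfi : fi = N := by omega
    rcases hbc with rfl | hbcmem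
    · omega
    · obtain ⟨hbclt, hMbc⟩ := hSound bc hbcmem
      have := hfiMin bc hbclt hMbc
      omega

-- ---- decidable table facts ----
 set_option maxRecDepth 100000 in
theorem pvCuisineFact1 : ∀ kp ∈ pvCuisinePri.items, kp.2 < pvCuisineKws.length ∧ kp.1 ∈ pvCuisineKws.getD kp.2 [] := by decide

 set_option maxRecDepth 100000 in
theorem pvCuisineFact2 : ∀ r ∈ List.range pvCuisineKws.length, ∀ w ∈ pvCuisineKws.getD r [],
    ∃ p ∈ List.range pvCuisineKws.length, p ≤ r ∧ pvCuisinePri.get? w = some p ∧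
      ((w.toList.length : Int)) ∈ pvLens ∧ w.toList ≠ [] := by decide

 set_option maxRecDepth 100000 in
theorem pvMealFact1 : ∀ kp ∈ pvMealPri.items, kp.2 < pvMealKws.length ∧ kp.1 ∈ pvMealKws.getD kp.2 [] := by decide

 set_option maxRecDepth 100000 in
theorem pvMealFact2 : ∀ r ∈ List.range pvMealKws.length, ∀ w ∈ pvMealKws.getD r [],
    ∃ p ∈ List.range pvMealKws.length, p ≤ r ∧ pvMealPri.get? w = some p ∧
      ((w.toList.length : Int)) ∈ pvLens ∧ w.toList ≠ [] := by decide

-- ---- B's scan computes foldl min over the hits ----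
theorem pvComponentEq (m : PySem.Dict String Nat) (t : String) (init : Nat) :
    (PySem.List.pyRange 0 (PySem.Str.len t) 1).foldl
      (fun c i => pvLens.foldl (fun c L => pvUpd m c (PySem.Str.slice t (some i) (some (i + L)))) c) init
    = (pvHits m t).foldl min init := by
  have hfun : (fun (c : Nat) (i : Int) =>
        pvLens.foldl (fun c L => pvUpd m c (PySem.Str.slice t (some i) (some (i + L)))) c)
      = (fun (c : Nat) (i : Int) =>
        (pvLens.map (fun L => PySem.Str.slice t (some i) (some (i + L)))).foldl
          (fun c s => pvUpd m c s) c) := by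
    funext c i
    rw [List.foldl_map]
  rw [hfun,
      pvFoldlFoldlFlatMap (fun c s => pvUpd m c s)
        (fun i => pvLens.map (fun L => PySem.Str.slice t (some i) (some (i + L))))]
  exact pvFoldlUpdEqMin m _ init

theorem pvScanEq (t : String) :
    (PySem.List.pyRange 0 (PySem.Str.len t) 1).foldl
      (fun (b : Nat × Nat) i =>
        pvLens.foldl (fun (b : Nat × Nat) L =>
          let sub := PySem.Str.slice t (some i) (some (i + L))
          (pvUpd pvCuisinePri b.1 sub, pvUpd pvMealPri b.2 sub)) b)
      (13, 4)
    = ((pvHits pvCuisinePri t).foldl min 13, (pvHits pvMealPri t).foldl min 4) := by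
  have hstep : (fun (b : Nat × Nat) (i : Int) =>
        pvLens.foldl (fun (b : Nat × Nat) L =>
          let sub := PySem.Str.slice t (some i) (some (i + L))
          (pvUpd pvCuisinePri b.1 sub, pvUpd pvMealPri b.2 sub)) b)
      = (fun (b : Nat × Nat) (i : Int) =>
        (pvLens.foldl (fun c L => pvUpd pvCuisinePri c (PySem.Str.slice t (some i) (some (i + L)))) b.1,
         pvLens.foldl (fun c L => pvUpd pvMealPri c (PySem.Str.slice t (some i) (some (i + L)))) b.2)) := by
    funext b i
    exact pvFoldlPairSplit
      (fun c L => pvUpd pvCuisinePri c (PySem.Str.slice t (some i) (some (i + L))))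
      (fun c L => pvUpd pvMealPri c (PySem.Str.slice t (some i) (some (i + L)))) pvLens b
  rw [hstep,
      pvFoldlPairSplit
        (fun c i => pvLens.foldl (fun c L => pvUpd pvCuisinePri c (PySem.Str.slice t (some i) (some (i + L)))) c)
        (fun c i => pvLens.foldl (fun c L => pvUpd pvMealPri c (PySem.Str.slice t (some i) (some (i + L)))) c)
        (PySem.List.pyRange 0 (PySem.Str.len t) 1) (13, 4),
      pvComponentEq pvCuisinePri t, pvComponentEq pvMealPri t]

-- ---- one table's result ----
theorem pvTableEq (m : PySem.Dict String Nat) (rs : List (List String)) (t : String)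
    (hfact1 : ∀ kp ∈ m.items, kp.2 < rs.length ∧ kp.1 ∈ rs.getD kp.2 [])
    (hfact2 : ∀ r ∈ List.range rs.length, ∀ w ∈ rs.getD r [],
      ∃ p ∈ List.range rs.length, p ≤ r ∧ m.get? w = some p ∧
        ((w.toList.length : Int)) ∈ pvLens ∧ w.toList ≠ []) :
    (pvHits m t).foldl min rs.length = pvFirstIdx t rs := by
  obtain ⟨hbc, hbcN, hbcLe⟩ := pvFoldlMinCases (pvHits m t) rs.length
  exact pvMinEqFirst rs.length (pvFirstIdx t rs) _ (pvHits m t)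
    (fun r => (rs.getD r []).any (fun w => PySem.Str.isIn w t) = true)
    (pvFirstIdx_le t rs) (pvFirstIdx_mtch t rs) (fun r hr h => pvFirstIdx_min t rs r hr h)
    hbc hbcN hbcLe (pvHitsSound m rs t hfact1)
    (fun r hr h => pvHitsComplete m rs t hfact2 r hr h)

-- ---- A as labels of the first matching rule ----
theorem pvGetDFirstIdx (t : String) (k : List String) (rest : List (List String))
    (lab : String) (labs : List String) (d : String) :
    (lab :: labs).getD (pvFirstIdx t (k :: rest)) d
    = if k.any (fun w => PySem.Str.isIn w t) then lab else labs.getD (pvFirstIdx t rest) d := by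
  simp only [pvFirstIdx]
  split
  · rfl
  · rw [List.getD_cons_succ]

theorem pvGetDFirstIdxNil (t : String) (lab : String) (labs : List String) (d : String) :
    (lab :: labs).getD (pvFirstIdx t []) d = lab := rfl

set_option maxHeartbeats 1000000 in
theorem pvChainEq (t : String) (categories : Option String) :
    determine_cuisine_and_meal_type t categories
    = (pvCuisineLabels.getD (pvFirstIdx (PySem.Str.lower t) pvCuisineKws) "",
       pvMealLabels.getD (pvFirstIdx (PySem.Str.lower t) pvMealKws) "") := by
  unfold determine_cuisine_and_meal_type
  simp only [pvCuisineKws, pvMealKws, pvCuisineLabels, pvMealLabels]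
  repeat rw [pvGetDFirstIdx]
  rw [pvGetDFirstIdxNil, pvGetDFirstIdxNil]

-- ===== VERDICT =====
theorem determine_cuisine_and_meal_type_spec : Claim_equal_determine_cuisine_and_meal_type := by
  intro title categories _
  show determine_cuisine_and_meal_type title categories = determine_cuisine_and_meal_type_alt title categories
  rw [pvChainEq]
  have halt : determine_cuisine_and_meal_type_alt title categories
      = (pvCuisineLabels.getD ((pvHits pvCuisinePri (PySem.Str.lower title)).foldl min 13) "",
         pvMealLabels.getD ((pvHits pvMealPri (PySem.Str.lower title)).foldl min 4) "") := by
    unfold determine_cuisine_and_meal_type_alt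
    dsimp only
    rw [pvScanEq]
  rw [halt,
      show (13 : Nat) = pvCuisineKws.length from rfl,
      show (4 : Nat) = pvMealKws.length from rfl,
      pvTableEq pvCuisinePri pvCuisineKws _ pvCuisineFact1 pvCuisineFact2,
      pvTableEq pvMealPri pvMealKws _ pvMealFact1 pvMealFact2]
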